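-- pv_equiv track=rewrite | github.com/harsha-yuvaraj/My-Disaster-Planner | app/risk_assessment.py | get_flood_zone_details
-- ===== SOURCE A (Python) =====
-- FLOOD_ZONE_DEFINITIONS = {
--     'High Risk': {
--         'codes': ['A', 'AE', 'AH', 'AO', 'A99', 'AR', 'V', 'VE'],
--         'description': 'Area with a 1% or greater annual chance of flooding.'
--     },
--     'Moderate Risk': {
--         'codes': ['B'],
--         'description': 'Area with a 0.2% annual chance of flooding.'
--     },
--     'Minimal Risk': {
--         'codes': ['C'],
--         'description': 'Area is outside the high and moderate risk floodplains.'
--     }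
-- }
--
-- def get_flood_zone_details(zone_code_string):
--     """
--     Looks up the risk level and description for a given FEMA flood zone string.
--     If multiple zones are provided (e.g., "AE, X"), it returns the description
--     for the highest risk category found.
--     """
--     if not zone_code_string or zone_code_string == "No infomation available":
--         return {'risk': '', 'description': ''}
--
--     # Split the input string into a list of individual zone codes
--     received_zones = [zone.strip() for zone in zone_code_string.split(',')]
--
--     # Check for High Risk zones first (highest priority)
--     for zone in received_zones:
--         if any(zone.startswith(code_prefix) for code_prefix in FLOOD_ZONE_DEFINITIONS['High Risk']['codes']):
--             return {'risk': 'High Risk', 'description': FLOOD_ZONE_DEFINITIONS['High Risk']['description']}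
--
--     # If no High Risk zones, check for Moderate Risk zones
--     for zone in received_zones:
--         if any(zone.startswith(code_prefix) for code_prefix in FLOOD_ZONE_DEFINITIONS['Moderate Risk']['codes']):
--             return {'risk': 'Moderate Risk', 'description': FLOOD_ZONE_DEFINITIONS['Moderate Risk']['description']}
--
--     # If no high or moderate risk zones are found, it's minimal risk or undetermined
--     for zone in received_zones:
--         if any(zone.startswith(code_prefix) for code_prefix in FLOOD_ZONE_DEFINITIONS['Minimal Risk']['codes']):
--             return {'risk': 'Minimal Risk', 'description': FLOOD_ZONE_DEFINITIONS['Minimal Risk']['description']}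
--
--     # Fallback for any other codes
--     return {'risk': 'Undetermined', 'description': 'This zone has an undetermined flood risk.'}
-- ===== SOURCE B (Python) =====
-- _RISK_BY_TIER = {
--     3: {'risk': 'High Risk', 'description': 'Area with a 1% or greater annual chance of flooding.'},
--     2: {'risk': 'Moderate Risk', 'description': 'Area with a 0.2% annual chance of flooding.'},
--     1: {'risk': 'Minimal Risk', 'description': 'Area is outside the high and moderate risk floodplains.'},
--     0: {'risk': 'Undetermined', 'description': 'This zone has an undetermined flood risk.'},
-- }
--
-- def _tier(zone):
--     # Every high-risk code ('A', 'AE', 'AH', 'AO', 'A99', 'AR', 'V', 'VE') starts with 'A' or 'V'.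
--     if zone.startswith(('A', 'V')):
--         return 3
--     if zone.startswith('B'):
--         return 2
--     if zone.startswith('C'):
--         return 1
--     return 0
--
-- def get_flood_zone_details(zone_code_string):
--     if not zone_code_string or zone_code_string == "No infomation available":
--         return {'risk': '', 'description': ''}
--     best = 0
--     for zone in zone_code_string.split(','):
--         best = max(best, _tier(zone.strip()))
--     return _RISK_BY_TIER[best]
-- ===== Notes on version B (the rewrite author's own statement) =====
-- stated objective: simpler
-- what changed: Replaces A's three sequential scans of the zone list (high, then moderate, then minimal) by a single pass that keeps a running maximum risk tier per zone and maps the final tier to the result dict.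
import Mathlib
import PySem

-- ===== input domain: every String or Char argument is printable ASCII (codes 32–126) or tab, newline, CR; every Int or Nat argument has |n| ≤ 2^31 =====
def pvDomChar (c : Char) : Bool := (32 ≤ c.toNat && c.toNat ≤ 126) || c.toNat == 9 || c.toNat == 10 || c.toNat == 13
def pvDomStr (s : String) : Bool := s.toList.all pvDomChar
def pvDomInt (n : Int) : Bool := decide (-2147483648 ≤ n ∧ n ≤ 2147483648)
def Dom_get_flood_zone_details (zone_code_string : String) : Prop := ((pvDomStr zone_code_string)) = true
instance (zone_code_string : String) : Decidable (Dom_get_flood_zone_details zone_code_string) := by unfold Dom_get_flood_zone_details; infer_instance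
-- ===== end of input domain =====

-- B replaces A's three sequential scans of the zone list by one pass keeping a running max-priority tier; same return values.

-- ===== PORT A =====
def pvHighCodes : List (List Char) := ["A".toList, "AE".toList, "AH".toList, "AO".toList, "A99".toList, "AR".toList, "V".toList, "VE".toList]

def get_flood_zone_details (zone_code_string : String) : List (String × String) :=
  if zone_code_string = "" ∨ zone_code_string = "No infomation available" then
    [("risk", ""), ("description", "")]
  else
    let received := (PySem.Chars.splitOn zone_code_string.toList ",".toList).map (fun z => PySem.Chars.strip z)
    if received.any (fun zone => pvHighCodes.any (fun c => PySem.Chars.startswith zone c)) then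
      [("risk", "High Risk"), ("description", "Area with a 1% or greater annual chance of flooding.")]
    else if received.any (fun zone => ["B".toList].any (fun c => PySem.Chars.startswith zone c)) then
      [("risk", "Moderate Risk"), ("description", "Area with a 0.2% annual chance of flooding.")]
    else if received.any (fun zone => ["C".toList].any (fun c => PySem.Chars.startswith zone c)) then
      [("risk", "Minimal Risk"), ("description", "Area is outside the high and moderate risk floodplains.")]
    else
      [("risk", "Undetermined"), ("description", "This zone has an undetermined flood risk.")]

-- ===== PORT B =====
def pvTier (zone : List Char) : Int :=
  if PySem.Chars.startswith zone "A".toList || PySem.Chars.startswith zone "V".toList then 3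
  else if PySem.Chars.startswith zone "B".toList then 2
  else if PySem.Chars.startswith zone "C".toList then 1
  else 0

def pvRiskByTier (best : Int) : List (String × String) :=
  if best = 3 then
    [("risk", "High Risk"), ("description", "Area with a 1% or greater annual chance of flooding.")]
  else if best = 2 then
    [("risk", "Moderate Risk"), ("description", "Area with a 0.2% annual chance of flooding.")]
  else if best = 1 then
    [("risk", "Minimal Risk"), ("description", "Area is outside the high and moderate risk floodplains.")]
  else
    [("risk", "Undetermined"), ("description", "This zone has an undetermined flood risk.")]

def get_flood_zone_details_alt (zone_code_string : String) : List (String × String) :=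
  if zone_code_string = "" ∨ zone_code_string = "No infomation available" then
    [("risk", ""), ("description", "")]
  else
    pvRiskByTier ((PySem.Chars.splitOn zone_code_string.toList ",".toList).foldl
      (fun best zone => max best (pvTier (PySem.Chars.strip zone))) 0)

-- ===== PRECONDITION & SPEC =====
def Spec_get_flood_zone_details (zone_code_string : String) (out : List (String × String)) : Prop := out = get_flood_zone_details_alt zone_code_string
instance (zone_code_string : String) (out : List (String × String)) : Decidable (Spec_get_flood_zone_details zone_code_string out) := by unfold Spec_get_flood_zone_details; infer_instance

-- ===== CLAIM (what is proved, stated in full; the proofs are below) =====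
def Claim_equal_get_flood_zone_details : Prop := ∀ (zone_code_string : String), Dom_get_flood_zone_details zone_code_string → Spec_get_flood_zone_details zone_code_string (get_flood_zone_details zone_code_string)

-- ===== LEMMAS AND PROOFS =====

theorem pvTier_cases (z : List Char) : pvTier z = 0 ∨ pvTier z = 1 ∨ pvTier z = 2 ∨ pvTier z = 3 := by
  unfold pvTier; split_ifs <;> simp

theorem pvTier_nonneg (z : List Char) : 0 ≤ pvTier z := by
  rcases pvTier_cases z with h | h | h | h <;> omega

theorem pvTier_le (z : List Char) : pvTier z ≤ 3 := by
  rcases pvTier_cases z with h | h | h | h <;> omega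

-- generalized-accumulator shape of B's fold
theorem pvFold_eq_max (zs : List (List Char)) : ∀ b : Int, 0 ≤ b →
    zs.foldl (fun best zone => max best (pvTier zone)) b
      = max b (zs.foldl (fun best zone => max best (pvTier zone)) 0) := by
  induction zs with
  | nil => intro b hb; simp; omega
  | cons z zs ih =>
      intro b hb
      simp only [List.foldl_cons]
      have h0 := pvTier_nonneg z
      rw [ih (max b (pvTier z)) (by omega), ih (max 0 (pvTier z)) (by omega)]
      omega

theorem pvMaxT_nonneg (zs : List (List Char)) :
    0 ≤ zs.foldl (fun best zone => max best (pvTier zone)) 0 := by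
  induction zs with
  | nil => simp
  | cons z zs ih =>
      simp only [List.foldl_cons]
      rw [pvFold_eq_max _ _ (by have := pvTier_nonneg z; omega)]
      omega

theorem pvMaxT_le (zs : List (List Char)) :
    zs.foldl (fun best zone => max best (pvTier zone)) 0 ≤ 3 := by
  induction zs with
  | nil => simp
  | cons z zs ih =>
      simp only [List.foldl_cons]
      rw [pvFold_eq_max _ _ (by have := pvTier_nonneg z; omega)]
      have := pvTier_le z
      omega

theorem pvLe_maxT_iff (zs : List (List Char)) (k : Int) (hk : 0 < k) :
    k ≤ zs.foldl (fun best zone => max best (pvTier zone)) 0 ↔ ∃ z ∈ zs, k ≤ pvTier z := by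
  induction zs with
  | nil => simp; omega
  | cons z zs ih =>
      simp only [List.foldl_cons]
      rw [pvFold_eq_max _ _ (by have := pvTier_nonneg z; omega)]
      simp only [List.mem_cons]
      constructor
      · intro h
        by_cases h1 : k ≤ pvTier z
        · exact ⟨z, Or.inl rfl, h1⟩
        · have h2 : k ≤ zs.foldl (fun best zone => max best (pvTier zone)) 0 := by omega
          obtain ⟨w, hw, hkw⟩ := ih.mp h2
          exact ⟨w, Or.inr hw, hkw⟩
      · rintro ⟨w, hw | hw, hkw⟩
        · subst hw; omega
        · have := ih.mpr ⟨w, hw, hkw⟩; omega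

-- any high-risk prefix matches iff the zone starts with 'A' or with 'V'
theorem pvHi_eq (z : List Char) :
    (pvHighCodes.any (fun c => PySem.Chars.startswith z c))
      = (PySem.Chars.startswith z "A".toList || PySem.Chars.startswith z "V".toList) := by
  apply Bool.eq_iff_iff.mpr
  simp only [pvHighCodes, List.any_cons, List.any_nil, Bool.or_false, Bool.or_eq_true,
    PySem.Chars.startswith_iff]
  constructor
  · rintro (h | h | h | h | h | h | h | h)
    · exact Or.inl h
    · exact Or.inl ((show "A".toList <+: "AE".toList by decide).trans h)
    · exact Or.inl ((show "A".toList <+: "AH".toList by decide).trans h)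
    · exact Or.inl ((show "A".toList <+: "AO".toList by decide).trans h)
    · exact Or.inl ((show "A".toList <+: "A99".toList by decide).trans h)
    · exact Or.inl ((show "A".toList <+: "AR".toList by decide).trans h)
    · exact Or.inr h
    · exact Or.inr ((show "V".toList <+: "VE".toList by decide).trans h)
  · rintro (h | h)
    · exact Or.inl h
    · exact Or.inr (Or.inr (Or.inr (Or.inr (Or.inr (Or.inr (Or.inl h))))))

theorem pvTier_eq_three_iff (z : List Char) :
    pvTier z = 3 ↔ (PySem.Chars.startswith z "A".toList || PySem.Chars.startswith z "V".toList) = true := by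
  unfold pvTier; split_ifs with h1 h2 h3
  · exact iff_of_true rfl h1
  · exact iff_of_false (by omega) h1
  · exact iff_of_false (by omega) h1
  · exact iff_of_false (by omega) h1

theorem pvTier_when_B (z : List Char) (h : PySem.Chars.startswith z "B".toList = true) : 2 ≤ pvTier z := by
  unfold pvTier; split_ifs <;> simp_all

theorem pvTier_when_C (z : List Char) (h : PySem.Chars.startswith z "C".toList = true) : 1 ≤ pvTier z := by
  unfold pvTier; split_ifs <;> simp_all

theorem pvTier_two_B (z : List Char) (h : pvTier z = 2) : PySem.Chars.startswith z "B".toList = true := by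
  revert h; unfold pvTier; split_ifs <;> simp_all

theorem pvTier_one_C (z : List Char) (h : pvTier z = 1) : PySem.Chars.startswith z "C".toList = true := by
  revert h; unfold pvTier; split_ifs <;> simp_all

-- main per-list lemma: A's three-scan cascade equals B's max-tier table lookup
theorem pvCascade_eq (zs : List (List Char)) :
    (if zs.any (fun zone => pvHighCodes.any (fun c => PySem.Chars.startswith zone c)) then
      [("risk", "High Risk"), ("description", "Area with a 1% or greater annual chance of flooding.")]
    else if zs.any (fun zone => ["B".toList].any (fun c => PySem.Chars.startswith zone c)) then
      [("risk", "Moderate Risk"), ("description", "Area with a 0.2% annual chance of flooding.")]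
    else if zs.any (fun zone => ["C".toList].any (fun c => PySem.Chars.startswith zone c)) then
      [("risk", "Minimal Risk"), ("description", "Area is outside the high and moderate risk floodplains.")]
    else
      [("risk", "Undetermined"), ("description", "This zone has an undetermined flood risk.")])
    = pvRiskByTier (zs.foldl (fun best zone => max best (pvTier zone)) 0) := by
  set m := zs.foldl (fun best zone => max best (pvTier zone)) 0 with hm
  have hb1 := pvMaxT_nonneg zs
  have hb2 := pvMaxT_le zs
  have hany3 : zs.any (fun zone => pvHighCodes.any (fun c => PySem.Chars.startswith zone c)) = true ↔ 3 ≤ m := by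
    simp only [pvHi_eq, List.any_eq_true]
    rw [hm, pvLe_maxT_iff zs 3 (by omega)]
    constructor
    · rintro ⟨z, hz, h⟩
      exact ⟨z, hz, le_of_eq ((pvTier_eq_three_iff z).mpr h).symm⟩
    · rintro ⟨z, hz, h⟩
      have h3 : pvTier z = 3 := le_antisymm (pvTier_le z) h
      exact ⟨z, hz, (pvTier_eq_three_iff z).mp h3⟩
  have hanyB : zs.any (fun zone => ["B".toList].any (fun c => PySem.Chars.startswith zone c)) = true → 2 ≤ m := by
    simp only [List.any_cons, List.any_nil, Bool.or_false, List.any_eq_true]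
    rintro ⟨z, hz, h⟩
    rw [hm]
    exact (pvLe_maxT_iff zs 2 (by omega)).mpr ⟨z, hz, pvTier_when_B z h⟩
  have hanyC : zs.any (fun zone => ["C".toList].any (fun c => PySem.Chars.startswith zone c)) = true → 1 ≤ m := by
    simp only [List.any_cons, List.any_nil, Bool.or_false, List.any_eq_true]
    rintro ⟨z, hz, h⟩
    rw [hm]
    exact (pvLe_maxT_iff zs 1 (by omega)).mpr ⟨z, hz, pvTier_when_C z h⟩
  have hcases : m = 0 ∨ m = 1 ∨ m = 2 ∨ m = 3 := by omega
  rcases hcases with h0 | h1 | h2 | h3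
  · have e3 : zs.any (fun zone => pvHighCodes.any (fun c => PySem.Chars.startswith zone c)) = false := by
      by_contra h; simp only [Bool.not_eq_false] at h; have := hany3.mp h; omega
    have eB : zs.any (fun zone => ["B".toList].any (fun c => PySem.Chars.startswith zone c)) = false := by
      by_contra h; simp only [Bool.not_eq_false] at h; have := hanyB h; omega
    have eC : zs.any (fun zone => ["C".toList].any (fun c => PySem.Chars.startswith zone c)) = false := by
      by_contra h; simp only [Bool.not_eq_false] at h; have := hanyC h; omega
    rw [if_neg (by simp only [e3]; simp), if_neg (by simp only [eB]; simp), if_neg (by simp only [eC]; simp), h0]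
    norm_num [pvRiskByTier]
  · have e3 : zs.any (fun zone => pvHighCodes.any (fun c => PySem.Chars.startswith zone c)) = false := by
      by_contra h; simp only [Bool.not_eq_false] at h; have := hany3.mp h; omega
    have eB : zs.any (fun zone => ["B".toList].any (fun c => PySem.Chars.startswith zone c)) = false := by
      by_contra h; simp only [Bool.not_eq_false] at h; have := hanyB h; omega
    have eC : zs.any (fun zone => ["C".toList].any (fun c => PySem.Chars.startswith zone c)) = true := by
      obtain ⟨z, hz, hk⟩ := (pvLe_maxT_iff zs 1 (by omega)).mp (by omega)
      have hA : pvTier z ≤ m := by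
        rw [hm]; exact (pvLe_maxT_iff zs (pvTier z) (by omega)).mpr ⟨z, hz, le_refl _⟩
      have hC : PySem.Chars.startswith z "C".toList = true := pvTier_one_C z (by omega)
      simp only [List.any_cons, List.any_nil, Bool.or_false, List.any_eq_true]
      exact ⟨z, hz, hC⟩
    rw [if_neg (by simp only [e3]; simp), if_neg (by simp only [eB]; simp), if_pos (by simp only [eC]), h1]
    norm_num [pvRiskByTier]
  · have e3 : zs.any (fun zone => pvHighCodes.any (fun c => PySem.Chars.startswith zone c)) = false := by
      by_contra h; simp only [Bool.not_eq_false] at h; have := hany3.mp h; omega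
    have eB : zs.any (fun zone => ["B".toList].any (fun c => PySem.Chars.startswith zone c)) = true := by
      obtain ⟨z, hz, hk⟩ := (pvLe_maxT_iff zs 2 (by omega)).mp (by omega)
      have hA : pvTier z ≤ m := by
        rw [hm]; exact (pvLe_maxT_iff zs (pvTier z) (by omega)).mpr ⟨z, hz, le_refl _⟩
      have hB : PySem.Chars.startswith z "B".toList = true := pvTier_two_B z (by omega)
      simp only [List.any_cons, List.any_nil, Bool.or_false, List.any_eq_true]
      exact ⟨z, hz, hB⟩
    rw [if_neg (by simp only [e3]; simp), if_pos (by simp only [eB]), h2]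
    norm_num [pvRiskByTier]
  · have e3 : zs.any (fun zone => pvHighCodes.any (fun c => PySem.Chars.startswith zone c)) = true :=
      hany3.mpr (by omega)
    rw [if_pos (by simp only [e3]), h3]
    norm_num [pvRiskByTier]

-- ===== VERDICT (by name: the statement is the Claim_ definition above) =====
theorem get_flood_zone_details_spec : Claim_equal_get_flood_zone_details := by
  intro s _
  unfold Spec_get_flood_zone_details get_flood_zone_details get_flood_zone_details_alt
  by_cases hg : s = "" ∨ s = "No infomation available"
  · rw [if_pos hg, if_pos hg]
  · rw [if_neg hg, if_neg hg]
    have h := pvCascade_eq ((PySem.Chars.splitOn s.toList ",".toList).map (fun z => PySem.Chars.strip z))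
    rw [List.foldl_map] at h
    exact h
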